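-- pv_equiv track=rewrite | github.com/acclivity2/SNHS-Python | SNHS-63.py | matchgoodwords
-- ===== SOURCE A (Python) =====
-- def matchgoodwords(thelist, theinput):      # find if any of the words in the list "thelist" exist in "theinput"
--     wipline = theinput.lower()
--     idx3 = 0
--     maxi = len(thelist)
--     while idx3 < maxi:
--         argx = thelist[idx3]
--         rm = wipline.find(argx)
--         if rm != -1:
--             rc = thelist[idx3+1]
--             if rc == "**S":                 # e.g. Lagoon, definitely SWT, force S
--                 rc = "S"
--             return rc
--         idx3 += 2
--     return 'X'
-- ===== SOURCE B (Python) =====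
-- def matchgoodwords(thelist, theinput):
--     # Different traversal: one sweep over the TEXT positions marking every (word, code)
--     # pair whose word starts there, then one scan over the pairs for the first marked one.
--     low = theinput.lower()
--     npairs = len(thelist) // 2
--     hit = [False] * npairs
--     for i in range(len(low) + 1):
--         for j in range(npairs):
--             if not hit[j] and low.startswith(thelist[2 * j], i):
--                 hit[j] = True
--     for j in range(npairs):
--         if hit[j]:
--             code = thelist[2 * j + 1]
--             return "S" if code == "**S" else code
--     return 'X'
-- ===== Notes on version B (the rewrite author's own statement) =====
-- stated objective: alternative
-- what changed: B inverts the traversal: instead of A's pattern-by-pattern substring search with early return, B makes one sweep over the text positions marking in a boolean table every complete (word,code) pair whose word starts at that position, then scans the table for the first marked pair; correct because a word occurs in the text iff it is a prefix at some position, and the first-in-list match is recovered by the final table scan.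
-- outside the precondition, e.g. on matchgoodwords(['zebra', 'Z', 'lagoon'], 'a blue lagoon'): A raises IndexError, B returns 'X'
import Mathlib
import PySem

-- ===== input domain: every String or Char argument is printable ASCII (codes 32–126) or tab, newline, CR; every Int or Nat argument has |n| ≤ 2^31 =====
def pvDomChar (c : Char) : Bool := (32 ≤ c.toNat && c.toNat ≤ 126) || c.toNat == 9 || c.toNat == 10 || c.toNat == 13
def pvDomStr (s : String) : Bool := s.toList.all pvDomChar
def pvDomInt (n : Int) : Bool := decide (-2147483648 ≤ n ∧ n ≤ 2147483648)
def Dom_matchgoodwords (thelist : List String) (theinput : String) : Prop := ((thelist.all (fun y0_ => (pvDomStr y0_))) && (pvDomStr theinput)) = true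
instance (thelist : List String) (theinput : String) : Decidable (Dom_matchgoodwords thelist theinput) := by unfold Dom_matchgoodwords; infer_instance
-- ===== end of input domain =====

-- B inverts the traversal (one sweep over the text positions marking every pair whose word starts
-- there, then a scan for the first marked pair) instead of A's pattern-by-pattern substring search;
-- return-value equivalence on Pre_; no speed claim.

-- ===== PORT A =====
-- A's while loop; on the branch where Python raises IndexError (thelist[idx3+1] out of range,
-- excluded by Pre_matchgoodwords) the port returns "X"
def matchgoodwordsGo (thelist : List String) (wipline : String) (idx3 : Nat) : String :=
  if _h : idx3 < thelist.length then
    let argx := thelist.getD idx3 ""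
    let rm := PySem.Str.find wipline argx
    if rm ≠ -1 then
      match thelist[idx3 + 1]? with
      | some rc => if rc = "**S" then "S" else rc
      | none => "X"      -- Python raises IndexError here; outside Pre_matchgoodwords
    else
      matchgoodwordsGo thelist wipline (idx3 + 2)
  else "X"
termination_by thelist.length - idx3

def matchgoodwords (thelist : List String) (theinput : String) : String :=
  matchgoodwordsGo thelist (PySem.Str.lower theinput) 0

-- ===== PORT B =====
-- low.startswith(w, i) for 0 ≤ i ≤ len(low): exact as prefix test on the drop (hand port)
def altSw (low : List Char) (w : String) (i : Nat) : Bool :=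
  w.toList.isPrefixOf (low.drop i)

-- the inner `for j in range(npairs)` pass of Source B at one text position i
def altInner (thelist : List String) (low : List Char) (i : Nat) (hit : List Bool) : List Bool :=
  (List.range (thelist.length / 2)).foldl
    (fun h j => if !(h.getD j false) && altSw low (thelist.getD (2 * j) "") i then h.set j true else h) hit

-- the final `for j in range(npairs): if hit[j]: …` scan of Source B (index counter j alongside hit)
def altScan (thelist : List String) : List Bool → Nat → String
  | [], _ => "X"
  | b :: rest, j =>
    if b then
      let code := thelist.getD (2 * j + 1) ""
      if code = "**S" then "S" else code
    else altScan thelist rest (j + 1)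

def matchgoodwords_alt (thelist : List String) (theinput : String) : String :=
  let low := (PySem.Str.lower theinput).toList
  let hit := (List.range (low.length + 1)).foldl (fun h i => altInner thelist low i h)
      (List.replicate (thelist.length / 2) false)
  altScan thelist hit 0

-- ===== PRECONDITION & SPEC =====
-- Pre_ excludes exactly the inputs where Python A raises IndexError: an odd-length list whose unpaired
-- trailing word occurs in the lowered input while no earlier even-index (paired) word does.
def Pre_matchgoodwords (thelist : List String) (theinput : String) : Prop :=
  thelist.length % 2 = 1 →
  PySem.Str.isIn (thelist.getD (thelist.length - 1) "") (PySem.Str.lower theinput) = true →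
  ∃ i < thelist.length - 1, i % 2 = 0 ∧
    PySem.Str.isIn (thelist.getD i "") (PySem.Str.lower theinput) = true
instance (thelist : List String) (theinput : String) : Decidable (Pre_matchgoodwords thelist theinput) := by
  unfold Pre_matchgoodwords; infer_instance
def pvWitness_matchgoodwords : List String × String := (["lagoon", "**S", "beach", "B"], "at the Beach")

def Spec_matchgoodwords (thelist : List String) (theinput : String) (out : String) : Prop := out = matchgoodwords_alt thelist theinput
instance (thelist : List String) (theinput : String) (out : String) : Decidable (Spec_matchgoodwords thelist theinput out) := by unfold Spec_matchgoodwords; infer_instance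

-- ===== CLAIM (what is proved, stated in full; the proofs are below) =====
def Claim_equal_matchgoodwords : Prop := ∀ (thelist : List String) (theinput : String), Dom_matchgoodwords thelist theinput → Pre_matchgoodwords thelist theinput → Spec_matchgoodwords thelist theinput (matchgoodwords thelist theinput)

-- ===== LEMMAS AND PROOFS =====

-- the marking step only ever sets entries to true; generic pointwise description of one inner pass
theorem inner_foldl_getElem? (c : Nat → Bool) :
    ∀ (js : List Nat) (h : List Bool) (k : Nat),
      ((js.foldl (fun h j => if !(h.getD j false) && c j then h.set j true else h) h))[k]? =
        if k ∈ js ∧ c k = true ∧ k < h.length then some true else h[k]? := by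
  intro js
  induction js with
  | nil => intro h k; simp
  | cons j js ih =>
    intro h k
    rw [List.foldl_cons, ih]
    have hlen : (if !(h.getD j false) && c j then h.set j true else h).length = h.length := by
      split_ifs <;> simp
    rw [hlen]
    by_cases hcond : k ∈ js ∧ c k = true ∧ k < h.length
    · rw [if_pos hcond]
      have hR : k ∈ j :: js ∧ c k = true ∧ k < h.length :=
        ⟨List.mem_cons_of_mem _ hcond.1, hcond.2⟩
      rw [if_pos hR]
    · rw [if_neg hcond]
      by_cases hk : k = j
      · subst hk
        by_cases hrest : c k = true ∧ k < h.length
        · have hgd : h.getD k false = h[k] := List.getD_eq_getElem h false hrest.2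
          have hR : k ∈ k :: js ∧ c k = true ∧ k < h.length :=
            ⟨List.mem_cons_self, hrest⟩
          cases hval : h[k] with
          | true =>
            have hstep : (!(h.getD k false) && c k) = false := by rw [hgd, hval]; simp
            rw [hstep, if_neg Bool.false_ne_true, if_pos hR,
              List.getElem?_eq_getElem hrest.2, hval]
          | false =>
            have hstep : (!(h.getD k false) && c k) = true := by rw [hgd, hval, hrest.1]; rfl
            rw [hstep, if_pos rfl, if_pos hR]
            exact List.getElem?_set_self hrest.2
        · have hR : ¬ (k ∈ k :: js ∧ c k = true ∧ k < h.length) :=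
            fun hx => hrest ⟨hx.2.1, hx.2.2⟩
          rw [if_neg hR]
          by_cases hc : c k = true
          · have hnl : ¬ k < h.length := fun hl => hrest ⟨hc, hl⟩
            split_ifs with hb
            · rw [List.getElem?_eq_none (l := h.set k true) (by simp; omega),
                List.getElem?_eq_none (by omega : h.length ≤ k)]
            · rfl
          · have hfalse : (!(h.getD k false) && c k) = false := by
              cases hcc : c k
              · simp
              · exact absurd hcc hc
            rw [hfalse, if_neg Bool.false_ne_true]
      · have hR : ¬ (k ∈ j :: js ∧ c k = true ∧ k < h.length) := by
          rintro ⟨hm, hc2, hl2⟩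
          rcases List.mem_cons.mp hm with h1 | h1
          · exact hk h1
          · exact hcond ⟨h1, hc2, hl2⟩
        rw [if_neg hR]
        split_ifs with hb
        · rw [List.getElem?_set_ne (fun hh => hk hh.symm)]
        · rfl

-- one inner pass preserves the table length
theorem altInner_length (thelist : List String) (low : List Char) (i : Nat) (hit : List Bool) :
    (altInner thelist low i hit).length = hit.length := by
  unfold altInner
  generalize List.range (thelist.length / 2) = js
  induction js generalizing hit with
  | nil => rfl
  | cons j js ih =>
    rw [List.foldl_cons, ih]
    split_ifs <;> simp

-- the whole sweep, pointwise: entry k of the table records "Q k or some processed position starts word k"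
theorem outer_foldl_getElem? (thelist : List String) (low : List Char) :
    ∀ (is : List Nat) (h : List Bool) (Q : Nat → Prop) [DecidablePred Q],
      h.length = thelist.length / 2 →
      (∀ k, k < thelist.length / 2 → h[k]? = some (decide (Q k))) →
      ∀ k, k < thelist.length / 2 →
        ((is.foldl (fun h i => altInner thelist low i h) h))[k]? =
          some (decide (Q k ∨ ∃ i ∈ is, altSw low (thelist.getD (2 * k) "") i = true)) := by
  intro is
  induction is with
  | nil => intro h Q _ _ hpt k hk; simp [hpt k hk]
  | cons i is ih =>
    intro h Q _ hlen hpt k hk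
    rw [List.foldl_cons]
    have hlen' : (altInner thelist low i h).length = thelist.length / 2 := by
      rw [altInner_length, hlen]
    have hpt' : ∀ k, k < thelist.length / 2 →
        (altInner thelist low i h)[k]? =
          some (decide (Q k ∨ altSw low (thelist.getD (2 * k) "") i = true)) := by
      intro k hk
      unfold altInner
      rw [inner_foldl_getElem? (fun j => altSw low (thelist.getD (2 * j) "") i)]
      by_cases hc : altSw low (thelist.getD (2 * k) "") i = true
      · rw [if_pos ⟨List.mem_range.mpr hk, hc, by omega⟩]
        rw [decide_eq_true (Or.inr hc)]
      · rw [if_neg (by tauto), hpt k hk]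
        congr 1
        rw [decide_eq_decide]
        tauto
    have := ih (altInner thelist low i h)
      (fun k => Q k ∨ altSw low (thelist.getD (2 * k) "") i = true) hlen' hpt' k hk
    rw [this]
    congr 1
    rw [decide_eq_decide]
    constructor
    · rintro (⟨hq | hi⟩ | ⟨i', hi', hs⟩)
      · exact Or.inl hq
      · exact Or.inr ⟨i, List.mem_cons_self, hi⟩
      · exact Or.inr ⟨i', List.mem_cons_of_mem _ hi', hs⟩
    · rintro (hq | ⟨i', hi', hs⟩)
      · exact Or.inl (Or.inl hq)
      · rcases List.mem_cons.mp hi' with h1 | h1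
        · exact Or.inl (Or.inr (h1 ▸ hs))
        · exact Or.inr ⟨i', h1, hs⟩

-- a word starts at some position of the sweep iff it is a substring
theorem exists_sw_iff_isIn (low : List Char) (w : String) :
    (∃ i ∈ List.range (low.length + 1), altSw low w i = true) ↔
      PySem.Chars.isIn w.toList low = true := by
  rw [← PySem.Chars.exists_prefix_drop_iff_isIn]
  constructor
  · rintro ⟨i, _, hs⟩
    exact ⟨i, List.isPrefixOf_iff_prefix.mp hs⟩
  · rintro ⟨j, hj⟩
    refine ⟨min j low.length, List.mem_range.mpr (by omega), ?_⟩
    unfold altSw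
    rw [List.isPrefixOf_iff_prefix]
    by_cases h : j ≤ low.length
    · simpa [Nat.min_eq_left h] using hj
    · have : low.drop j = [] := List.drop_eq_nil_of_le (by omega)
      rw [this] at hj
      have hw : w.toList = [] := List.prefix_nil.mp hj
      simp [hw]
-- the first-match table of a pair list: entry j says whether word j occurs
def hitOf (l : List String) (wip : String) : List Bool :=
  (List.range (l.length / 2)).map (fun j => PySem.Chars.isIn (l.getD (2 * j) "").toList wip.toList)

-- Source B's sweep produces exactly hitOf
theorem sweep_eq_hitOf (thelist : List String) (wip : String) :
    (List.range (wip.toList.length + 1)).foldl (fun h i => altInner thelist wip.toList i h)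
        (List.replicate (thelist.length / 2) false) = hitOf thelist wip := by
  apply List.ext_getElem?
  intro k
  by_cases hk : k < thelist.length / 2
  · have := outer_foldl_getElem? thelist wip.toList (List.range (wip.toList.length + 1))
      (List.replicate (thelist.length / 2) false) (fun _ => False)
      (by simp) (by intro k hk; simp [hk]) k hk
    rw [this]
    have hrhs : (hitOf thelist wip)[k]? =
        some (PySem.Chars.isIn (thelist.getD (2 * k) "").toList wip.toList) := by
      unfold hitOf
      rw [List.getElem?_map]
      simp [List.getElem?_range hk]
    rw [hrhs]
    congr 1
    have hiff := exists_sw_iff_isIn wip.toList (thelist.getD (2 * k) "")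
    cases hb : PySem.Chars.isIn (thelist.getD (2 * k) "").toList wip.toList with
    | true => exact decide_eq_true (Or.inr (hiff.mpr hb))
    | false =>
      apply decide_eq_false
      rintro (hf | hE)
      · exact hf
      · rw [hiff.mp hE] at hb; exact absurd hb (by decide)
  · have h1 : ∀ (l : List Bool), l.length = thelist.length / 2 → l[k]? = none := by
      intro l hl
      exact List.getElem?_eq_none (by omega)
    rw [h1 _ (by
        have : ∀ (is : List Nat) (h : List Bool),
            (is.foldl (fun h i => altInner thelist wip.toList i h) h).length = h.length := by
          intro is
          induction is with
          | nil => intro h; rfl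
          | cons i is ih => intro h; rw [List.foldl_cons, ih, altInner_length]
        rw [this]; simp),
      h1 _ (by simp [hitOf])]

-- stepping A's while loop two indices forward past a dropped leading pair
theorem goShiftAux (a b : String) (l : List String) (wip : String) :
    ∀ (n idx : Nat), l.length - idx ≤ n →
      matchgoodwordsGo (a :: b :: l) wip (idx + 2) = matchgoodwordsGo l wip idx := by
  intro n
  induction n with
  | zero =>
    intro idx hle
    have h : ¬ idx < l.length := by omega
    have h2 : ¬ idx + 2 < (a :: b :: l).length := by simp; omega
    conv_lhs => rw [matchgoodwordsGo]
    conv_rhs => rw [matchgoodwordsGo]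
    rw [dif_neg h2, dif_neg h]
  | succ n ih =>
    intro idx hle
    by_cases h : idx < l.length
    · have h2 : idx + 2 < (a :: b :: l).length := by simp; omega
      conv_lhs => rw [matchgoodwordsGo]
      conv_rhs => rw [matchgoodwordsGo]
      rw [dif_pos h2, dif_pos h]
      have e1 : (a :: b :: l).getD (idx + 2) "" = l.getD idx "" := by simp [List.getD]
      have e2 : (a :: b :: l)[idx + 2 + 1]? = l[idx + 1]? := by simp
      simp only [e1, e2]
      split_ifs with hf
      · rfl
      · exact ih (idx + 2) (by omega)
    · have h2 : ¬ idx + 2 < (a :: b :: l).length := by simp; omega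
      conv_lhs => rw [matchgoodwordsGo]
      conv_rhs => rw [matchgoodwordsGo]
      rw [dif_neg h2, dif_neg h]

theorem matchgoodwordsGo_shift (a b : String) (l : List String) (wip : String) (idx : Nat) :
    matchgoodwordsGo (a :: b :: l) wip (idx + 2) = matchgoodwordsGo l wip idx :=
  goShiftAux a b l wip (l.length - idx) idx le_rfl

-- the final scan ignores the two dropped leading entries when the counter is advanced
theorem altScan_shift (a b : String) (l : List String) :
    ∀ (hs : List Bool) (j : Nat), altScan (a :: b :: l) hs (j + 1) = altScan l hs j := by
  intro hs
  induction hs with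
  | nil => intro j; rfl
  | cons x hs ih =>
    intro j
    unfold altScan
    have e : (a :: b :: l).getD (2 * (j + 1) + 1) "" = l.getD (2 * j + 1) "" := by
      have : 2 * (j + 1) + 1 = (2 * j + 1) + 2 := by omega
      rw [this]; simp [List.getD]
    rw [e, ih]

-- core: A's loop equals the final scan of the occurrence table
theorem core (l : List String) (wip : String) :
    matchgoodwordsGo l wip 0 = altScan l (hitOf l wip) 0 := by
  match l with
  | [] => rw [matchgoodwordsGo]; simp [hitOf, altScan]
  | [a] =>
    have h1 : (0 : Nat) < [a].length := by simp
    conv_lhs => rw [matchgoodwordsGo]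
    rw [dif_pos h1]
    show (if PySem.Str.find wip ([a].getD 0 "") ≠ -1 then
        match [a][0 + 1]? with
        | some rc => if rc = "**S" then "S" else rc
        | none => "X"
      else matchgoodwordsGo [a] wip (0 + 2)) = _
    have hr : hitOf [a] wip = [] := by simp [hitOf]
    rw [hr]
    by_cases hf : PySem.Str.find wip ([a].getD 0 "") ≠ -1
    · rw [if_pos hf]; simp [altScan]
    · rw [if_neg hf]
      conv_lhs => rw [matchgoodwordsGo]
      norm_num [altScan]
  | a :: b :: rest =>
    have hlen : (0 : Nat) < (a :: b :: rest).length := by simp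
    conv_lhs => rw [matchgoodwordsGo]
    rw [dif_pos hlen]
    show (if PySem.Str.find wip ((a :: b :: rest).getD 0 "") ≠ -1 then
        match (a :: b :: rest)[0 + 1]? with
        | some rc => if rc = "**S" then "S" else rc
        | none => "X"
      else matchgoodwordsGo (a :: b :: rest) wip (0 + 2)) = _
    have hhit : hitOf (a :: b :: rest) wip =
        PySem.Chars.isIn a.toList wip.toList :: hitOf rest wip := by
      unfold hitOf
      have hn : (a :: b :: rest).length / 2 = rest.length / 2 + 1 := by simp; omega
      rw [hn, List.range_succ_eq_map, List.map_cons, List.map_map]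
      congr 1
    rw [hhit]
    have hinfix : (PySem.Str.find wip ((a :: b :: rest).getD 0 "") ≠ -1) ↔
        (PySem.Chars.isIn a.toList wip.toList = true) := by
      have e0 : (a :: b :: rest).getD 0 "" = a := rfl
      rw [e0, PySem.Str.find_ne_neg_one_iff, PySem.Chars.isIn_iff_infix]
    by_cases hf : PySem.Str.find wip ((a :: b :: rest).getD 0 "") ≠ -1
    · rw [if_pos hf]
      have hb : PySem.Chars.isIn a.toList wip.toList = true := hinfix.mp hf
      rw [altScan, if_pos hb]
      simp [List.getD]
    · rw [if_neg hf]
      have hb : PySem.Chars.isIn a.toList wip.toList = false := by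
        cases hc : PySem.Chars.isIn a.toList wip.toList
        · rfl
        · exact absurd (hinfix.mpr hc) hf
      rw [altScan, hb, if_neg (by simp)]
      rw [matchgoodwordsGo_shift a b rest wip 0, altScan_shift, core rest wip]
termination_by l.length

-- ===== VERDICT (by name: the statement is the Claim_ definition above) =====
theorem matchgoodwords_spec : Claim_equal_matchgoodwords := by
  intro thelist theinput _ _
  unfold Spec_matchgoodwords matchgoodwords
  rw [core]
  show altScan thelist (hitOf thelist (PySem.Str.lower theinput)) 0 =
    altScan thelist
      ((List.range ((PySem.Str.lower theinput).toList.length + 1)).foldl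
        (fun h i => altInner thelist (PySem.Str.lower theinput).toList i h)
        (List.replicate (thelist.length / 2) false)) 0
  rw [sweep_eq_hitOf]
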